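-- pv_equiv track=rewrite | github.com/ChanghyunRyu/Python-CodingTest-note | binary_search/cross_the_stepping_stones/cross_the_stepping_stones_review_2.py | check_step_stones
-- ===== SOURCE A (Python) =====
-- def check_step_stones(stones, number, k):
--     count = 0
--     for stone in stones:
--         step = stone - number
--         if step >= 0:
--             count = 0
--         elif step < 0:
--             count += 1
--             if count >= k:
--                 return False
--     return True
-- ===== SOURCE B (Python) =====
-- def check_step_stones(stones, number, k):
--     # scan the sequence as maximal runs: skip stones >= number one by one;
--     # when a below-`number` stone is found, measure the whole run at once
--     i, n = 0, len(stones)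
--     while i < n:
--         if stones[i] < number:
--             j = i + 1
--             while j < n and stones[j] < number:
--                 j += 1
--             if j - i >= k:
--                 return False
--             i = j
--         else:
--             i += 1
--     return True
-- ===== Notes on version B (the rewrite author's own statement) =====
-- stated objective: alternative
-- what changed: B replaces A's reset-on-success running counter (decided one stone at a time with an early-return check on each increment) by a two-level scan over maximal runs: an inner scan measures each full run of below-number stones and its length is compared with k once per run.
import Mathlib
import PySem

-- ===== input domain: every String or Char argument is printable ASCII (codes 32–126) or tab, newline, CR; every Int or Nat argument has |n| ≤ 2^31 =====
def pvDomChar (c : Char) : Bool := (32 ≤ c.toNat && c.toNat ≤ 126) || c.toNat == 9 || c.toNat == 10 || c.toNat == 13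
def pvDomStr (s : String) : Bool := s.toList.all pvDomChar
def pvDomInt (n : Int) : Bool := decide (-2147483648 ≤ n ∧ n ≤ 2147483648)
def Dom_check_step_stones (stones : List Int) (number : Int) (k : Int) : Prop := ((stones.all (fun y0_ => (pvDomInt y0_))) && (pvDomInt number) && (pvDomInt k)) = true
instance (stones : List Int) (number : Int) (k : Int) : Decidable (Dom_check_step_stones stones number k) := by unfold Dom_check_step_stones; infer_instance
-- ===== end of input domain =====

-- B scans the stones as maximal runs (inner scan per run) instead of A's reset-on-success counter; same cost, different decomposition.

-- ===== PORT A =====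
-- A's for-loop with its early return, as a recursion carrying the counter.
def goA (number k : Int) : List Int → Int → Bool
  | [], _ => true
  | stone :: rest, count =>
    let step := stone - number
    if step ≥ 0 then goA number k rest 0
    else if step < 0 then
      let count' := count + 1
      if count' ≥ k then false else goA number k rest count'
    else goA number k rest count

def check_step_stones (stones : List Int) (number : Int) (k : Int) : Bool :=
  goA number k stones 0

-- ===== PORT B =====
-- inner while-loop of Source B: length of the maximal below-`number` prefix and the remaining list
def takeRun (number : Int) : List Int → Nat × List Int
  | [] => (0, [])
  | s :: rest =>
    if s < number then
      let p := takeRun number rest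
      (p.1 + 1, p.2)
    else (0, s :: rest)

theorem takeRun_length_le (number : Int) (l : List Int) :
    (takeRun number l).2.length ≤ l.length := by
  induction l with
  | nil => simp [takeRun]
  | cons s rest ih =>
    by_cases h : s < number
    · simp only [takeRun, if_pos h]
      exact Nat.le_succ_of_le ih
    · simp [takeRun, if_neg h]

-- outer while-loop of Source B
def altGo (number k : Int) (xs : List Int) : Bool :=
  match xs with
  | [] => true
  | s :: rest =>
    if s < number then
      let p := takeRun number rest
      if ((p.1 : Int) + 1) ≥ k then false
      else altGo number k p.2
    else altGo number k rest
termination_by xs.length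
decreasing_by
  · exact Nat.lt_succ_of_le (takeRun_length_le number rest)
  · simp

def check_step_stones_alt (stones : List Int) (number : Int) (k : Int) : Bool :=
  altGo number k stones

-- ===== PRECONDITION & SPEC =====
def Spec_check_step_stones (stones : List Int) (number : Int) (k : Int) (out : Bool) : Prop := out = check_step_stones_alt stones number k
instance (stones : List Int) (number : Int) (k : Int) (out : Bool) : Decidable (Spec_check_step_stones stones number k out) := by unfold Spec_check_step_stones; infer_instance

-- ===== CLAIM (what is proved, stated in full; the proofs are below) =====
def Claim_equal_check_step_stones : Prop := ∀ (stones : List Int) (number : Int) (k : Int), Dom_check_step_stones stones number k → Spec_check_step_stones stones number k (check_step_stones stones number k)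

-- ===== LEMMAS AND PROOFS =====

-- A's loop over the below-prefix run: false iff the counter crosses k inside the run,
-- otherwise continue on the rest with the accumulated counter.
theorem goA_run (number k : Int) (l : List Int) (c : Int) :
    goA number k l c =
      if ((takeRun number l).1 : Int) + c ≥ k ∧ 0 < (takeRun number l).1 then false
      else goA number k (takeRun number l).2 (c + (takeRun number l).1) := by
  induction l generalizing c with
  | nil => simp [takeRun, goA]
  | cons s rest ih =>
    by_cases hs : s < number
    · have hstep : ¬ (s - number ≥ 0) := by omega
      simp only [takeRun, if_pos hs, goA, if_neg hstep, if_pos (by omega : s - number < 0)]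
      split_ifs with h1 h2 h2
      · rfl
      · exfalso; push_cast at h2; omega
      · rw [ih]
        rw [if_pos (by push_cast at h2 ⊢; omega :
          ((takeRun number rest).1 : Int) + (c + 1) ≥ k ∧ 0 < (takeRun number rest).1)]
      · rw [ih]
        rw [if_neg (by push_cast at h2 ⊢; omega :
          ¬ (((takeRun number rest).1 : Int) + (c + 1) ≥ k ∧ 0 < (takeRun number rest).1))]
        congr 1
        push_cast
        ring
    · simp [takeRun, hs, goA]

-- the rest after a run starts with a non-below stone (or is empty), so A's counter there is irrelevant
theorem goA_rest_indep (number k : Int) (l : List Int) (c : Int) :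
    goA number k (takeRun number l).2 c = goA number k (takeRun number l).2 0 := by
  induction l with
  | nil => simp [takeRun, goA]
  | cons s rest ih =>
    by_cases hs : s < number
    · simpa [takeRun, hs] using ih
    · simp [takeRun, hs, goA]

theorem goA_eq_altGo (number k : Int) (xs : List Int) :
    goA number k xs 0 = altGo number k xs := by
  match xs with
  | [] => simp [goA, altGo]
  | s :: rest =>
    by_cases hs : s < number
    · rw [altGo]
      simp only [if_pos hs]
      rw [goA_run]
      simp only [takeRun, if_pos hs]
      split_ifs with h1 h2 h2
      · rfl
      · exfalso; push_cast at h1 h2; omega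
      · exfalso; push_cast at h1 h2; omega
      · rw [goA_rest_indep, goA_eq_altGo number k (takeRun number rest).2]
    · rw [altGo]
      simp only [if_neg hs]
      rw [← goA_eq_altGo number k rest]
      have hle : number ≤ s := by omega
      simp [goA, hle]
termination_by xs.length
decreasing_by
  · exact Nat.lt_succ_of_le (takeRun_length_le number rest)
  · simp

-- ===== VERDICT (by name: the statement is the Claim_ definition above) =====
theorem check_step_stones_spec : Claim_equal_check_step_stones := by
  intro stones number k _
  unfold Spec_check_step_stones check_step_stones check_step_stones_alt
  exact goA_eq_altGo number k stones
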